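-- pv_equiv track=rewrite | github.com/kris-randen/google-2024-leetcode | 02 Union-Find/737 Medium LC Sentence Similarity II.py | similaritys
-- ===== SOURCE A (Python) =====
-- from functools import reduce
--
-- class UnionFindSet:
--     def __init__(self, items):
--         self.items = items; self.n = len(items)
--         self.map = {item: ind for ind, item in enumerate(items)}
--         self.id = [i for i in range(self.n)]
--         self.comps = {i: {i} for i in range(self.n)}
--         self.max = 1
--
--     def size(self, i):
--         return len(self.comps[i])
--
--     def is_root(self, i):
--         return i == self.id[i]
--
--     def not_root(self, i):
--         return not self.is_root(i)
--
--     def parent(self, i):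
--         return self.id[i]
--
--     def make_parent(self, i, p):
--         self.id[i] = p
--
--     def path(self, i):
--         p = [i]
--         while self.not_root(i):
--             i = self.parent(i)
--             p += [i]
--         return p
--
--     def compress(self, path):
--         root = path[-1]
--         for p in path: self.make_parent(p, root)
--         return root
--
--     def find(self, i):
--         return self.compress(self.path(i))
--
--     def split(self, p, q):
--         return (p, q) if self.size(p) > self.size(q) else (q, p)
--
--     def union(self, i, j):
--         p, q = self.find(i), self.find(j)
--         if p == q: return
--         return self.join(p, q)
--
--     def connect(self, a, b):
--         self.union(self.map[a], self.map[b])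
--
--     def merge_comp(self, s, l):
--         self.comps[l] = self.comps[l].union(self.comps.pop(s))
--
--     def join(self, p, q):
--         l, s = self.split(p, q)
--         self.make_parent(s, l)
--         self.merge_comp(s, l)
--         self.max = max(self.max, len(self.comps[l]))
--         return l
--
--     def connected(self, a, b):
--         return self.find(self.map[a]) == self.find(self.map[b])
--
-- def similaritys(sentence1, sentence2, similarPairs):
--     if len(sentence1) != len(sentence2): return False
--     pairs = reduce(lambda x, y: x + y, similarPairs, [])
--     words = set(pairs + sentence1 + sentence2)
--     uf = UnionFindSet(words)
--     for a, b in similarPairs: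
--         uf.connect(a, b)
--     for word1, word2 in zip(sentence1, sentence2):
--         if not uf.connected(word1, word2): return False
--     return True
-- ===== SOURCE B (Python) =====
-- def similaritys(sentence1, sentence2, similarPairs):
--     if len(sentence1) != len(sentence2): return False
--     # build disjoint similarity classes by merging overlapping sets, one pass over the pairs
--     classes = []
--     for pair in similarPairs:
--         a, b = pair
--         merged = {a, b}
--         rest = []
--         for s in classes:
--             if a in s or b in s:
--                 merged |= s
--             else:
--                 rest.append(s)
--         classes = rest + [merged]
--     for w1, w2 in zip(sentence1, sentence2):
--         if w1 == w2: continue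
--         if not any(w1 in s and w2 in s for s in classes): return False
--     return True
-- ===== Notes on version B (the rewrite author's own statement) =====
-- stated objective: simpler
-- what changed: Replaces the union-find (index map, parent forest with path compression, component dict) by a direct partition: one pass merges overlapping word-sets per pair, then each query checks equality or joint membership in a class.
import Mathlib
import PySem

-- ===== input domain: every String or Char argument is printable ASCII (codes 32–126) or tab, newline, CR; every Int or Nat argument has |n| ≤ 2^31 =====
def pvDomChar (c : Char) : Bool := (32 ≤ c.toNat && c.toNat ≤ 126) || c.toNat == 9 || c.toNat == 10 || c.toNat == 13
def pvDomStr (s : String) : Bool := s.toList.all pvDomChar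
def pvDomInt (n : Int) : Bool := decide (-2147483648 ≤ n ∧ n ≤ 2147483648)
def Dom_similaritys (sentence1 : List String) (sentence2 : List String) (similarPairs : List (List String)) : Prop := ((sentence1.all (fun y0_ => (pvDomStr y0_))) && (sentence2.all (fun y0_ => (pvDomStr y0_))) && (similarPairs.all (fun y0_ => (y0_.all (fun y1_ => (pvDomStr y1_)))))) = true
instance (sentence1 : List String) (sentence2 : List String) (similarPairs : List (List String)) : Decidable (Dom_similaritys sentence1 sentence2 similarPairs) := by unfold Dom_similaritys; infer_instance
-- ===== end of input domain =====

-- B replaces A's union-find (index map, parent forest with path compression, component dict)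
-- by a direct partition into word-sets, merged per pair in one pass; equivalence of the RETURN
-- value is proved (A's set-iteration order only fixes internal indices, not the result).

-- ===== PORT A =====
structure PvUF where
  items : List String
  map : PySem.Dict String Int
  id : List Int
  comps : PySem.Dict Int (PySem.Set Int)
  max : Int

def pvUFInit (words : List String) : PvUF :=
  { items := words
  , map := (PySem.List.enumerate words 0).foldl (fun d p => d.insert p.2 p.1) PySem.Dict.empty
  , id := PySem.List.pyRange 0 (words.length : Int) 1
  , comps := (PySem.List.pyRange 0 (words.length : Int) 1).foldl
      (fun d i => d.insert i (PySem.Set.ofList [i])) PySem.Dict.empty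
  , max := 1 }

-- self.comps[i]: the key is present whenever Python evaluates this (roots are comps keys)
def pvSize (st : PvUF) (i : Int) : Int := PySem.Set.len (st.comps.getD i PySem.Set.empty)

-- p = [i]; while not root: i = parent(i); p += [i].  Fuel = len(id): Python's while loop
-- terminates because id is a parent forest (proved below: chain length ≤ d i + 1 ≤ len(id)).
def pvPath (idl : List Int) : Nat → Int → List Int → List Int
  | 0, _, p => p
  | fuel + 1, i, p =>
      if PySem.List.pyGetD idl i 0 == i then p
      else
        let i' := PySem.List.pyGetD idl i 0
        pvPath idl fuel i' (p ++ [i'])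

-- root = path[-1]; for p in path: id[p] = root  (indices are in range whenever Python runs this)
def pvCompress (st : PvUF) (path : List Int) : PvUF × Int :=
  let root := PySem.List.pyGetD path (-1) 0
  ({ st with id := path.foldl (fun l p => PySem.List.pySetD l p root) st.id }, root)

def pvFind (st : PvUF) (i : Int) : PvUF × Int :=
  pvCompress st (pvPath st.id st.id.length i [i])

def pvSplit (st : PvUF) (p q : Int) : Int × Int :=
  if pvSize st p > pvSize st q then (p, q) else (q, p)

def pvJoin (st : PvUF) (p q : Int) : PvUF × Int :=
  let ls := pvSplit st p q
  let st1 := { st with id := PySem.List.pySetD st.id ls.2 ls.1 }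
  let cs := st1.comps.getD ls.2 PySem.Set.empty
  let newset := PySem.Set.union (st1.comps.getD ls.1 PySem.Set.empty) cs
  let comps2 := (st1.comps.erase ls.2).insert ls.1 newset
  ({ st1 with comps := comps2, max := max st1.max (PySem.Set.len newset) }, ls.1)

def pvUnion (st : PvUF) (i j : Int) : PvUF :=
  let r1 := pvFind st i
  let r2 := pvFind r1.1 j
  if r1.2 == r2.2 then r2.1 else (pvJoin r2.1 r1.2 r2.2).1

-- self.map[a], self.map[b]: the keys are present whenever Python runs this (words ⊇ pair words)
def pvConnect (st : PvUF) (a b : String) : PvUF :=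
  pvUnion st (st.map.getD a 0) (st.map.getD b 0)

def pvConnected (st : PvUF) (a b : String) : PvUF × Bool :=
  let r1 := pvFind st (st.map.getD a 0)
  let r2 := pvFind r1.1 (r1.1.map.getD b 0)
  (r2.1, r1.2 == r2.2)

def pvCheckAll (st : PvUF) : List (String × String) → Bool
  | [] => true
  | (w1, w2) :: rest =>
      let r := pvConnected st w1 w2
      if r.2 then pvCheckAll r.1 rest else false

def similaritys (sentence1 : List String) (sentence2 : List String) (similarPairs : List (List String)) : Bool :=
  if sentence1.length ≠ sentence2.length then false
  else
    let pairs := similarPairs.foldl (fun x y => x ++ y) []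
    let words : PySem.Set String := PySem.Set.ofList (pairs ++ sentence1 ++ sentence2)
    let uf0 := pvUFInit words
    -- 'for a, b in similarPairs': unpacking raises on a pair of length ≠ 2 — outside Pre_
    let uf1 := similarPairs.foldl (fun st p =>
        match p with
        | [a, b] => pvConnect st a b
        | _ => st) uf0
    pvCheckAll uf1 (sentence1.zip sentence2)

-- ===== PORT B =====
def pvMergePair (cs : List (PySem.Set String)) (a b : String) : List (PySem.Set String) :=
  let mr := cs.foldl
      (fun (mr : PySem.Set String × List (PySem.Set String)) s =>
        if PySem.Set.contains s a || PySem.Set.contains s b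
        then (PySem.Set.union mr.1 s, mr.2)
        else (mr.1, mr.2 ++ [s]))
      (PySem.Set.ofList [a, b], [])
  mr.2 ++ [mr.1]

-- 'a, b = pair' raises on a pair of length ≠ 2 — outside Pre_
def pvStepB (cs : List (PySem.Set String)) (p : List String) : List (PySem.Set String) :=
  if h : p.length = 2 then pvMergePair cs (p[0]'(by omega)) (p[1]'(by omega)) else cs

def similaritys_alt (sentence1 : List String) (sentence2 : List String) (similarPairs : List (List String)) : Bool :=
  if sentence1.length ≠ sentence2.length then false
  else
    let classes := similarPairs.foldl pvStepB []
    (sentence1.zip sentence2).all (fun w =>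
      w.1 == w.2 || classes.any (fun s => PySem.Set.contains s w.1 && PySem.Set.contains s w.2))

-- ===== PRECONDITION & SPEC =====
-- A (and B) raise ValueError unpacking a similar-pair whose length is not 2; that is only
-- reached when the sentence lengths are equal (otherwise both return False first).
def Pre_similaritys (sentence1 : List String) (sentence2 : List String) (similarPairs : List (List String)) : Prop :=
  sentence1.length ≠ sentence2.length ∨ ∀ p ∈ similarPairs, p.length = 2
instance (sentence1 : List String) (sentence2 : List String) (similarPairs : List (List String)) : Decidable (Pre_similaritys sentence1 sentence2 similarPairs) := by unfold Pre_similaritys; infer_instance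

def pvWitness_similaritys : List String × List String × List (List String) :=
  (["great", "acting"], ["fine", "drama"], [["great", "fine"], ["acting", "drama"]])

def Spec_similaritys (sentence1 : List String) (sentence2 : List String) (similarPairs : List (List String)) (out : Bool) : Prop := out = similaritys_alt sentence1 sentence2 similarPairs
instance (sentence1 : List String) (sentence2 : List String) (similarPairs : List (List String)) (out : Bool) : Decidable (Spec_similaritys sentence1 sentence2 similarPairs out) := by unfold Spec_similaritys; infer_instance

-- ===== CLAIM (what is proved, stated in full; the proofs are below) =====
def Claim_equal_similaritys : Prop := ∀ (sentence1 : List String) (sentence2 : List String) (similarPairs : List (List String)), Dom_similaritys sentence1 sentence2 similarPairs → Pre_similaritys sentence1 sentence2 similarPairs → Spec_similaritys sentence1 sentence2 similarPairs (similaritys sentence1 sentence2 similarPairs)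

-- ===== LEMMAS AND PROOFS =====

-- The forest invariant for A's id array: f assigns every index its root, d is a strictly
-- decreasing measure along parent edges, bounded by the size of the index's f-class.
structure PvInv (idl : List Int) (f : Nat → Nat) (d : Nat → Nat) : Prop where
  hr : ∀ k, k < idl.length → 0 ≤ idl.getD k 0 ∧ (idl.getD k 0).toNat < idl.length
  hedge : ∀ k, k < idl.length → f (idl.getD k 0).toNat = f k
  hroot : ∀ k, k < idl.length → idl.getD k 0 = (k : Int) → f k = k
  hflt : ∀ k, k < idl.length → f k < idl.length
  hfix : ∀ k, k < idl.length → idl.getD (f k) 0 = ((f k : Nat) : Int)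
  hd : ∀ k, k < idl.length → idl.getD k 0 ≠ (k : Int) → d (idl.getD k 0).toNat < d k
  hdb : ∀ k, k < idl.length → d k < ((Finset.range idl.length).filter (fun j => f j = f k)).card

theorem pvInv_d_root (idl : List Int) (f d : Nat → Nat) (hinv : PvInv idl f d) :
    ∀ k, k < idl.length → d (f k) ≤ d k ∧ (idl.getD k 0 ≠ (k : Int) → d (f k) < d k) := by
  suffices h : ∀ m k, k < idl.length → d k ≤ m →
      d (f k) ≤ d k ∧ (idl.getD k 0 ≠ (k : Int) → d (f k) < d k) by
    intro k hk; exact h (d k) k hk le_rfl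
  intro m
  induction m with
  | zero =>
    intro k hk hdk
    by_cases hrt : idl.getD k 0 = (k : Int)
    · rw [hinv.hroot k hk hrt]
      exact ⟨le_rfl, fun h => absurd hrt h⟩
    · exact absurd (Nat.lt_of_lt_of_le (hinv.hd k hk hrt) hdk) (Nat.not_lt_zero _)
  | succ m ih =>
    intro k hk hdk
    by_cases hrt : idl.getD k 0 = (k : Int)
    · rw [hinv.hroot k hk hrt]
      exact ⟨le_rfl, fun h => absurd hrt h⟩
    · have hk' := (hinv.hr k hk).2
      have hlt := hinv.hd k hk hrt
      have hedge := hinv.hedge k hk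
      have := (ih (idl.getD k 0).toNat hk' (by omega)).1
      rw [hedge] at this
      exact ⟨by omega, fun _ => by omega⟩

theorem pvGetNN (xs : List Int) (i : Int) (h : 0 ≤ i) :
    PySem.List.pyGetD xs i 0 = xs.getD i.toNat 0 := by
  by_cases hi : i.toNat < xs.length
  · rw [PySem.List.pyGetD_eq_getElem xs 0 h (by omega),
        List.getD_eq_getElem xs 0 hi]
  · rw [PySem.List.pyGetD_of_none, List.getD_eq_default]
    · omega
    · rw [PySem.List.pyGet?_eq_none_iff]
      simp [PySem.Raise.InRange]
      omega

theorem pvPath_spec (idl : List Int) (f d : Nat → Nat) (hinv : PvInv idl f d) :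
    ∀ (fuel : Nat) (i : Int) (acc : List Int), 0 ≤ i → i.toNat < idl.length → d i.toNat < fuel →
    PySem.List.pyGetD acc (-1) 0 = i →
    ∃ t, pvPath idl fuel i acc = acc ++ t ∧
      (∀ e ∈ t, 0 ≤ e ∧ e.toNat < idl.length ∧ f e.toNat = f i.toNat) ∧
      PySem.List.pyGetD (acc ++ t) (-1) 0 = ((f i.toNat : Nat) : Int) := by
  intro fuel
  induction fuel with
  | zero => intro i acc h0 hn hfuel; omega
  | succ fuel ih =>
    intro i acc h0 hn hfuel hlast
    simp only [pvPath]
    rw [pvGetNN idl i h0]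
    by_cases hrt : idl.getD i.toNat 0 = i
    · simp only [hrt, BEq.rfl, if_true]
      refine ⟨[], by simp, by simp, ?_⟩
      have : f i.toNat = i.toNat := hinv.hroot i.toNat hn (by rw [hrt]; omega)
      simp [this, hlast]
      omega
    · have hbeq : (idl.getD i.toNat 0 == i) = false := beq_eq_false_iff_ne.mpr hrt
      simp only [hbeq, Bool.false_eq_true, if_false]
      have hr := hinv.hr i.toNat hn
      have hedge := hinv.hedge i.toNat hn
      have hdlt := hinv.hd i.toNat hn (by omega)
      obtain ⟨t', heq, hprops, hlast'⟩ := ih (idl.getD i.toNat 0) (acc ++ [idl.getD i.toNat 0])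
        hr.1 hr.2 (by omega) (PySem.List.pyGetD_neg_one_append_singleton _ _ _)
      refine ⟨idl.getD i.toNat 0 :: t', by rw [heq]; simp, ?_, ?_⟩
      · intro e he
        rcases List.mem_cons.mp he with rfl | he'
        · exact ⟨hr.1, hr.2, hedge⟩
        · have := hprops e he'
          exact ⟨this.1, this.2.1, by rw [this.2.2, hedge]⟩
      · rw [show acc ++ idl.getD i.toNat 0 :: t' = (acc ++ [idl.getD i.toNat 0]) ++ t' by simp,
            hlast', hedge]

theorem pvSetFold (r : Int) :
    ∀ (t : List Int) (idl : List Int), (∀ e ∈ t, 0 ≤ e ∧ e.toNat < idl.length) →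
    (t.foldl (fun l p => PySem.List.pySetD l p r) idl).length = idl.length ∧
    ∀ k, k < idl.length →
      (t.foldl (fun l p => PySem.List.pySetD l p r) idl).getD k 0 =
        if (k : Int) ∈ t then r else idl.getD k 0 := by
  intro t
  induction t with
  | nil => intro idl ht; simp
  | cons e rest ih =>
    intro idl ht
    have he := ht e (List.mem_cons_self ..)
    simp only [List.foldl_cons, PySem.List.pySetD_of_nonneg idl r he.1]
    have hlen : (idl.set e.toNat r).length = idl.length := by simp
    obtain ⟨ihl, ihg⟩ := ih (idl.set e.toNat r)
      (fun x hx => by have := ht x (List.mem_cons_of_mem _ hx); omega)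
    refine ⟨by omega, ?_⟩
    intro k hk
    rw [ihg k (by omega)]
    by_cases hmem : (k : Int) ∈ rest
    · simp [hmem]
    · simp only [hmem, if_false, List.mem_cons]
      by_cases hke : (k : Int) = e
      · have : e.toNat = k := by omega
        simp [hke, this, List.getD_eq_getElem?_getD, List.getElem?_set, hk]
      · have : e.toNat ≠ k := by omega
        simp [hke, hmem, List.getD_eq_getElem?_getD, List.getElem?_set, this]

theorem pvCompress_inv (idl : List Int) (f d : Nat → Nat) (hinv : PvInv idl f d)
    (r0 : Nat) (hr0 : r0 < idl.length) (hr0f : f r0 = r0) (t : List Int)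
    (ht : ∀ e ∈ t, 0 ≤ e ∧ e.toNat < idl.length ∧ f e.toNat = r0) :
    PvInv (t.foldl (fun l p => PySem.List.pySetD l p ((r0 : Nat) : Int)) idl) f d ∧
    (t.foldl (fun l p => PySem.List.pySetD l p ((r0 : Nat) : Int)) idl).length = idl.length := by
  obtain ⟨hlen, hget⟩ := pvSetFold ((r0 : Nat) : Int) t idl (fun e he => ⟨(ht e he).1, (ht e he).2.1⟩)
  have hmemf : ∀ k : Nat, (k : Int) ∈ t → f k = r0 := by
    intro k hk
    have := ht _ hk
    simpa using this.2.2
  have hdro := pvInv_d_root idl f d hinv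
  have hidem : ∀ k, k < idl.length → f (f k) = f k :=
    fun k hk => hinv.hroot (f k) (hinv.hflt k hk) (hinv.hfix k hk)
  refine ⟨⟨?_, ?_, ?_, ?_, ?_, ?_, ?_⟩, hlen⟩ <;> rw [hlen] <;> intro k hk <;>
    try rw [hget k hk]
  · by_cases hm : (k : Int) ∈ t
    · simp [hm]; omega
    · simp only [hm, if_false]; exact hinv.hr k hk
  · by_cases hm : (k : Int) ∈ t
    · simp only [hm, if_true, Int.toNat_natCast]
      rw [hmemf k hm, hr0f]
    · simp only [hm, if_false]; exact hinv.hedge k hk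
  · by_cases hm : (k : Int) ∈ t
    · simp only [hm, if_true]
      intro hek
      have : k = r0 := by omega
      rw [this, hr0f]
    · simp only [hm, if_false]; exact hinv.hroot k hk
  · exact hinv.hflt k hk
  · have hfk := hinv.hflt k hk
    rw [hget (f k) hfk]
    by_cases hm : ((f k : Nat) : Int) ∈ t
    · have hfkr : f (f k) = r0 := hmemf (f k) hm
      rw [hidem k hk] at hfkr
      rw [hfkr]
      split_ifs with h2
      · rfl
      · have hx := hinv.hfix k hk
        rw [hfkr] at hx
        exact hx
    · simp only [hm, if_false]; exact hinv.hfix k hk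
  · by_cases hm : (k : Int) ∈ t
    · simp only [hm, if_true, Int.toNat_natCast]
      intro hrk
      have hkr : k ≠ r0 := by omega
      have hne : idl.getD k 0 ≠ (k : Int) := by
        intro he
        exact hkr (by rw [← hmemf k hm, hinv.hroot k hk he])
      have := (pvInv_d_root idl f d hinv k hk).2 hne
      rw [hmemf k hm] at this
      exact this
    · simp only [hm, if_false]; exact hinv.hd k hk
  · exact hinv.hdb k hk

theorem pvFind_spec (st : PvUF) (f d : Nat → Nat) (hinv : PvInv st.id f d)
    (i : Int) (h0 : 0 ≤ i) (hn : i.toNat < st.id.length) :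
    (pvFind st i).2 = ((f i.toNat : Nat) : Int) ∧
    (pvFind st i).1.map = st.map ∧
    (pvFind st i).1.comps = st.comps ∧
    (pvFind st i).1.id.length = st.id.length ∧
    PvInv (pvFind st i).1.id f d := by
  have hfuel : d i.toNat < st.id.length :=
    Nat.lt_of_lt_of_le (hinv.hdb i.toNat hn) (by
      simpa using Finset.card_filter_le (Finset.range st.id.length) (fun j => f j = f i.toNat))
  have hlast0 : PySem.List.pyGetD [i] (-1) 0 = i := by
    simpa using PySem.List.pyGetD_neg_one_append_singleton ([] : List Int) i 0
  obtain ⟨t, heq, hprops, hlast⟩ := pvPath_spec st.id f d hinv st.id.length i [i] h0 hn hfuel hlast0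
  have hpath : pvPath st.id st.id.length i [i] = [i] ++ t := by simpa using heq
  have hidem : f (f i.toNat) = f i.toNat :=
    hinv.hroot (f i.toNat) (hinv.hflt i.toNat hn) (hinv.hfix i.toNat hn)
  have ht : ∀ e ∈ [i] ++ t, 0 ≤ e ∧ e.toNat < st.id.length ∧ f e.toNat = f i.toNat := by
    intro e he
    rcases List.mem_append.mp he with he | he
    · rcases List.mem_singleton.mp he with rfl
      exact ⟨h0, hn, rfl⟩
    · exact hprops e he
  obtain ⟨hinv', hlen'⟩ := pvCompress_inv st.id f d hinv (f i.toNat) (hinv.hflt i.toNat hn)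
    hidem ([i] ++ t) ht
  simp only [pvFind, pvCompress, hpath]
  rw [show PySem.List.pyGetD ([i] ++ t) (-1) 0 = ((f i.toNat : Nat) : Int) from by simpa using hlast]
  exact ⟨rfl, trivial, trivial, hlen', hinv'⟩

theorem pvLink_inv (idl : List Int) (f d : Nat → Nat) (hinv : PvInv idl f d)
    (sn ln : Nat) (hs : sn < idl.length) (hl : ln < idl.length)
    (hfs : f sn = sn) (hfl : f ln = ln) (hne : sn ≠ ln) :
    PvInv (idl.set sn ((ln : Nat) : Int)) (fun k => if f k = sn then ln else f k)
      (fun k => if f k = sn then d k + d ln + 1 else d k) := by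
  have hget : ∀ k, k < idl.length →
      (idl.set sn ((ln : Nat) : Int)).getD k 0 = if k = sn then ((ln : Nat) : Int) else idl.getD k 0 := by
    intro k hk
    by_cases hks : sn = k
    · subst hks; simp [List.getD_eq_getElem?_getD, List.getElem?_set, hk]
    · simp [List.getD_eq_getElem?_getD, List.getElem?_set, hks, Ne.symm hks]
  have hlen : (idl.set sn ((ln : Nat) : Int)).length = idl.length := by simp
  have hlns : ln ≠ sn := Ne.symm hne
  constructor <;> rw [hlen] <;> intro k hk <;> try rw [hget k hk]
  · by_cases hks : k = sn
    · simp [hks]; omega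
    · simp only [hks, if_false]; exact hinv.hr k hk
  · by_cases hks : k = sn
    · simp only [hks, if_true, Int.toNat_natCast, hfl, hlns, if_false, hfs, if_true]
    · simp only [hks, if_false]
      rw [hinv.hedge k hk]
  · by_cases hks : k = sn
    · simp only [hks, if_true]
      intro he
      exact absurd (by omega : ln = sn) hlns
    · simp only [hks, if_false]
      intro he
      have hfk := hinv.hroot k hk he
      simp [hfk, hks]
  · by_cases hks : f k = sn <;> simp [hks] <;> [exact hl; exact hinv.hflt k hk]
  · by_cases hks : f k = sn
    · simp only [hks, if_true]
      rw [hget ln hl]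
      simp only [hlns, if_false]
      have := hinv.hfix ln hl
      rwa [hfl] at this
    · simp only [hks, if_false]
      rw [hget (f k) (hinv.hflt k hk)]
      simp only [hks, if_false]
      exact hinv.hfix k hk
  · by_cases hks : k = sn
    · simp only [hks, if_true, Int.toNat_natCast, hfl, hlns, if_false, hfs, if_true]
      intro _
      omega
    · simp only [hks, if_false]
      intro he
      have hdlt := hinv.hd k hk he
      have hedge' := hinv.hedge k hk
      rw [hedge']
      by_cases hfk : f k = sn
      · simp only [hfk, if_true]; omega
      · simp only [hfk, if_false]; omega
  · have hdisj : Disjoint ((Finset.range idl.length).filter (fun j => f j = sn))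
        ((Finset.range idl.length).filter (fun j => f j = ln)) := by
      rw [Finset.disjoint_filter]
      intro j _ hj1 hj2
      exact hne (hj1 ▸ hj2 ▸ rfl)
    have hset : ((Finset.range idl.length).filter (fun j => (if f j = sn then ln else f j) = ln)) =
        ((Finset.range idl.length).filter (fun j => f j = sn)) ∪
        ((Finset.range idl.length).filter (fun j => f j = ln)) := by
      rw [← Finset.filter_or]
      apply Finset.filter_congr
      intro j _
      by_cases hj : f j = sn <;> simp [hj, hlns]
    by_cases hks : f k = sn
    · simp only [if_pos hks]
      rw [hset, Finset.card_union_of_disjoint hdisj]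
      have h1 := hinv.hdb k hk
      have h2 := hinv.hdb ln hl
      rw [hks] at h1
      rw [hfl] at h2
      omega
    · simp only [if_neg hks]
      by_cases hkl : f k = ln
      · rw [hkl, hset, Finset.card_union_of_disjoint hdisj]
        have h2 := hinv.hdb k hk
        rw [hkl] at h2
        omega
      · have hset2 : ((Finset.range idl.length).filter
            (fun j => (if f j = sn then ln else f j) = f k)) =
            ((Finset.range idl.length).filter (fun j => f j = f k)) := by
          apply Finset.filter_congr
          intro j _
          by_cases hj : f j = sn
          · simp only [hj, if_true]
            omega
          · simp [hj]
        rw [hset2]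
        exact hinv.hdb k hk

theorem pvUnion_spec (st : PvUF) (f d : Nat → Nat) (hinv : PvInv st.id f d)
    (i j : Int) (h0i : 0 ≤ i) (h0j : 0 ≤ j)
    (hni : i.toNat < st.id.length) (hnj : j.toNat < st.id.length) :
    ∃ f' d', PvInv (pvUnion st i j).id f' d' ∧
      (pvUnion st i j).map = st.map ∧ (pvUnion st i j).id.length = st.id.length ∧
      ∀ a b : Nat, (f' a = f' b ↔ (f a = f b ∨
        ((f a = f i.toNat ∨ f a = f j.toNat) ∧ (f b = f i.toNat ∨ f b = f j.toNat)))) := by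
  obtain ⟨hr1, hm1, _, hl1, hi1⟩ := pvFind_spec st f d hinv i h0i hni
  obtain ⟨hr2, hm2, _, hl2, hi2⟩ := pvFind_spec (pvFind st i).1 f d hi1 j h0j (by omega)
  set p := f i.toNat with hp
  set q := f j.toNat with hq
  have hplt : p < st.id.length := hinv.hflt i.toNat hni
  have hqlt : q < st.id.length := hinv.hflt j.toNat hnj
  have hpf : f p = p := hinv.hroot p hplt (hinv.hfix i.toNat hni)
  have hqf : f q = q := hinv.hroot q hqlt (hinv.hfix j.toNat hnj)
  simp only [pvUnion, hr1, hr2]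
  by_cases hpq : p = q
  · rw [if_pos (by simpa using congrArg (fun n : Nat => (n : Int)) hpq)]
    refine ⟨f, d, hi2, by rw [hm2, hm1], by omega, ?_⟩
    intro a b
    constructor
    · exact Or.inl
    · rintro (h | ⟨ha, hb⟩)
      · exact h
      · omega
  · rw [if_neg (by simpa using hpq)]
    set st2 := (pvFind (pvFind st i).1 j).1 with hst2
    obtain ⟨sn, ln, hsplit, hcases⟩ : ∃ sn ln : Nat,
        pvSplit st2 ((p : Nat) : Int) ((q : Nat) : Int) = (((ln : Nat) : Int), ((sn : Nat) : Int)) ∧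
        ((sn = p ∧ ln = q) ∨ (sn = q ∧ ln = p)) := by
      unfold pvSplit
      split_ifs
      · exact ⟨q, p, rfl, Or.inr ⟨rfl, rfl⟩⟩
      · exact ⟨p, q, rfl, Or.inl ⟨rfl, rfl⟩⟩
    have hsn : sn < st2.id.length := by omega
    have hln : ln < st2.id.length := by omega
    have hfsn : f sn = sn := by rcases hcases with ⟨h1, _⟩ | ⟨h1, _⟩ <;> rw [h1] <;> assumption
    have hfln : f ln = ln := by rcases hcases with ⟨_, h2⟩ | ⟨_, h2⟩ <;> rw [h2] <;> assumption
    have hsnln : sn ≠ ln := by rcases hcases with ⟨h1, h2⟩ | ⟨h1, h2⟩ <;> omega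
    have hid : (pvJoin st2 ((p : Nat) : Int) ((q : Nat) : Int)).1.id = st2.id.set sn ((ln : Nat) : Int) := by
      simp only [pvJoin, hsplit]
      rw [PySem.List.pySetD_of_nonneg _ _ (by omega)]
      simp
    have hmap : (pvJoin st2 ((p : Nat) : Int) ((q : Nat) : Int)).1.map = st2.map := by
      simp only [pvJoin, hsplit]
    have hinv3 := pvLink_inv st2.id f d hi2 sn ln hsn hln hfsn hfln hsnln
    refine ⟨fun k => if f k = sn then ln else f k, fun k => if f k = sn then d k + d ln + 1 else d k,
      by rw [hid]; exact hinv3, by rw [hmap, hm2, hm1], by rw [hid]; simp; omega, ?_⟩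
    intro a b
    rcases hcases with ⟨h1, h2⟩ | ⟨h1, h2⟩ <;> subst h1 <;> subst h2 <;>
      beta_reduce <;> split_ifs with ha hb hb <;> omega

theorem pvConnected_spec (st : PvUF) (f d : Nat → Nat) (hinv : PvInv st.id f d) (a b : String)
    (h0a : 0 ≤ st.map.getD a 0) (hna : (st.map.getD a 0).toNat < st.id.length)
    (h0b : 0 ≤ st.map.getD b 0) (hnb : (st.map.getD b 0).toNat < st.id.length) :
    (pvConnected st a b).2 = decide (f (st.map.getD a 0).toNat = f (st.map.getD b 0).toNat) ∧
    (pvConnected st a b).1.map = st.map ∧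
    (pvConnected st a b).1.id.length = st.id.length ∧
    PvInv (pvConnected st a b).1.id f d := by
  obtain ⟨hr1, hm1, _, hl1, hi1⟩ := pvFind_spec st f d hinv (st.map.getD a 0) h0a hna
  obtain ⟨hr2, hm2, _, hl2, hi2⟩ := pvFind_spec (pvFind st (st.map.getD a 0)).1 f d hi1
    ((pvFind st (st.map.getD a 0)).1.map.getD b 0) (by rw [hm1]; exact h0b) (by rw [hm1]; omega)
  rw [hm1] at hr2 hm2 hl2 hi2
  simp only [pvConnected, hm1, hr1, hr2]
  refine ⟨?_, hm2, by omega, hi2⟩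
  by_cases h : f (st.map.getD a 0).toNat = f (st.map.getD b 0).toNat <;> simp [h]

def pvMapOf (words : List String) : PySem.Dict String Int :=
  (PySem.List.enumerate words 0).foldl (fun d p => d.insert p.2 p.1) PySem.Dict.empty

theorem pvMap_nodup_keys (words : List String) : (pvMapOf words).keys.Nodup := by
  unfold pvMapOf
  exact PySem.Dict.nodup_keys_foldl_insert_key _ _ _ _ (by simp [PySem.Dict.keys_empty])

theorem pvMap_getD (words : List String) (hnd : words.Nodup) (k : Nat) (hk : k < words.length) :
    (pvMapOf words).getD words[k] 0 = (k : Int) := by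
  have hitems : (pvMapOf words).items =
      PySem.Dict.empty.items ++ (PySem.List.enumerate words 0).map (fun p => (p.2, p.1)) := by
    unfold pvMapOf
    exact PySem.Dict.items_foldl_insert_fresh _ _ _ _
      (fun p _ => PySem.Dict.contains_empty _)
      (by rw [PySem.List.map_snd_enumerate]; exact hnd)
  apply PySem.Dict.getD_of_mem_items _ _ (pvMap_nodup_keys words)
  rw [hitems, show PySem.Dict.empty.items = ([] : List (String × Int)) from rfl, List.nil_append]
  apply List.mem_map.mpr
  refine ⟨((k : Int), words[k]), ?_, rfl⟩
  rw [PySem.List.mem_enumerate_iff]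
  exact ⟨k, hk, by simp⟩

theorem pvIdx_mem (words : List String) (hnd : words.Nodup) (a : String) (ha : a ∈ words) :
    0 ≤ (pvMapOf words).getD a 0 ∧ ((pvMapOf words).getD a 0).toNat < words.length ∧
    words[((pvMapOf words).getD a 0).toNat]? = some a := by
  obtain ⟨k, hk, rfl⟩ := List.mem_iff_getElem.mp ha
  rw [pvMap_getD words hnd k hk]
  simpa using hk

theorem pvIdx_inj (words : List String) (hnd : words.Nodup) (a b : String)
    (ha : a ∈ words) (hb : b ∈ words)
    (h : ((pvMapOf words).getD a 0).toNat = ((pvMapOf words).getD b 0).toNat) : a = b := by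
  have h1 := (pvIdx_mem words hnd a ha).2.2
  have h2 := (pvIdx_mem words hnd b hb).2.2
  rw [h] at h1
  rw [h1] at h2
  exact Option.some_injective _ h2

theorem pvInit_inv (n : Nat) : PvInv (PySem.List.pyRange 0 (n : Int) 1) (fun k => k) (fun _ => 0) := by
  have hlen : (PySem.List.pyRange 0 (n : Int) 1).length = n := by
    rw [PySem.List.length_pyRange_one]; omega
  have hget : ∀ k, k < n → (PySem.List.pyRange 0 (n : Int) 1).getD k 0 = (k : Int) := by
    intro k hk
    rw [List.getD_eq_getElem _ _ (by omega), PySem.List.getElem_pyRange_one]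
    omega
  constructor <;> rw [hlen] <;> intro k hk <;> try rw [hget k hk]
  · constructor <;> omega
  · simp
  · intro _; rfl
  · exact hk
  · intro h; exact absurd rfl h
  · apply Finset.card_pos.mpr
    exact ⟨k, by simp [Finset.mem_filter, Finset.mem_range, hk]⟩

def pvSameB (cs : List (PySem.Set String)) (x y : String) : Prop := ∃ s ∈ cs, x ∈ s ∧ y ∈ s

def pvReach (cs : List (PySem.Set String)) (a b x : String) : Prop :=
  x = a ∨ x = b ∨ ∃ s ∈ cs, x ∈ s ∧ (a ∈ s ∨ b ∈ s)

theorem pvMerge_fold (a b : String) :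
    ∀ (cs : List (PySem.Set String)) (m0 : PySem.Set String) (r0 : List (PySem.Set String)),
    m0.Nodup →
    (∀ x, x ∈ (cs.foldl (fun (mr : PySem.Set String × List (PySem.Set String)) s =>
        if PySem.Set.contains s a || PySem.Set.contains s b
        then (PySem.Set.union mr.1 s, mr.2) else (mr.1, mr.2 ++ [s])) (m0, r0)).1 ↔
      x ∈ m0 ∨ ∃ s ∈ cs, x ∈ s ∧ (a ∈ s ∨ b ∈ s)) ∧
    (cs.foldl (fun (mr : PySem.Set String × List (PySem.Set String)) s =>
        if PySem.Set.contains s a || PySem.Set.contains s b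
        then (PySem.Set.union mr.1 s, mr.2) else (mr.1, mr.2 ++ [s])) (m0, r0)).2 =
      r0 ++ cs.filter (fun s => !(PySem.Set.contains s a || PySem.Set.contains s b)) := by
  intro cs
  induction cs with
  | nil => intro m0 r0 hnd; simp
  | cons s rest ih =>
    intro m0 r0 hnd
    simp only [List.foldl_cons]
    by_cases hs : (PySem.Set.contains s a || PySem.Set.contains s b) = true
    · rw [if_pos hs]
      obtain ⟨ih1, ih2⟩ := ih (PySem.Set.union m0 s) r0 (PySem.Set.nodup_union m0 s hnd)
      constructor
      · intro x
        rw [ih1 x, PySem.Set.mem_union]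
        have hs' : a ∈ s ∨ b ∈ s := by
          rcases Bool.or_eq_true_iff.mp hs with h | h
          · exact Or.inl ((PySem.Set.contains_iff s a).mp h)
          · exact Or.inr ((PySem.Set.contains_iff s b).mp h)
        constructor
        · rintro ((h | h) | h)
          · exact Or.inl h
          · exact Or.inr ⟨s, List.mem_cons_self .., h, hs'⟩
          · obtain ⟨t, ht, hx⟩ := h
            exact Or.inr ⟨t, List.mem_cons_of_mem _ ht, hx⟩
        · rintro (h | ⟨t, ht, hx⟩)
          · exact Or.inl (Or.inl h)
          · rcases List.mem_cons.mp ht with rfl | ht'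
            · exact Or.inl (Or.inr hx.1)
            · exact Or.inr ⟨t, ht', hx⟩
      · rw [ih2, List.filter_cons, if_neg (by rw [hs]; simp)]
    · rw [if_neg hs]
      obtain ⟨ih1, ih2⟩ := ih m0 (r0 ++ [s]) hnd
      have hs' : ¬(a ∈ s ∨ b ∈ s) := by
        rintro (h | h)
        · exact hs (Bool.or_eq_true_iff.mpr (Or.inl ((PySem.Set.contains_iff s a).mpr h)))
        · exact hs (Bool.or_eq_true_iff.mpr (Or.inr ((PySem.Set.contains_iff s b).mpr h)))
      constructor
      · intro x
        rw [ih1 x]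
        constructor
        · rintro (h | ⟨t, ht, hx⟩)
          · exact Or.inl h
          · exact Or.inr ⟨t, List.mem_cons_of_mem _ ht, hx⟩
        · rintro (h | ⟨t, ht, hx⟩)
          · exact Or.inl h
          · rcases List.mem_cons.mp ht with rfl | ht'
            · exact absurd hx.2 hs'
            · exact Or.inr ⟨t, ht', hx⟩
      · rw [ih2, List.filter_cons, if_pos (by simp only [Bool.not_eq_true] at hs; rw [hs]; simp)]
        simp

theorem pvMergePair_sameB (cs : List (PySem.Set String)) (a b x y : String) :
    pvSameB (pvMergePair cs a b) x y ↔
      pvSameB cs x y ∨ (pvReach cs a b x ∧ pvReach cs a b y) := by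
  obtain ⟨h1, h2⟩ := pvMerge_fold a b cs (PySem.Set.ofList [a, b]) []
    (PySem.Set.nodup_ofList _)
  have hm : ∀ z, z ∈ (cs.foldl (fun (mr : PySem.Set String × List (PySem.Set String)) s =>
      if PySem.Set.contains s a || PySem.Set.contains s b
      then (PySem.Set.union mr.1 s, mr.2) else (mr.1, mr.2 ++ [s]))
      (PySem.Set.ofList [a, b], [])).1 ↔ pvReach cs a b z := by
    intro z
    rw [h1 z, PySem.Set.mem_ofList]
    unfold pvReach
    simp [or_assoc]
  unfold pvMergePair pvSameB
  dsimp only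
  rw [h2]
  constructor
  · rintro ⟨s, hs, hx, hy⟩
    rcases List.mem_append.mp hs with hs | hs
    · simp only [List.nil_append] at hs
      exact Or.inl ⟨s, List.mem_of_mem_filter hs, hx, hy⟩
    · rcases List.mem_singleton.mp hs with rfl
      exact Or.inr ⟨(hm x).mp hx, (hm y).mp hy⟩
  · rintro (⟨s, hs, hx, hy⟩ | ⟨hx, hy⟩)
    · by_cases htouch : (PySem.Set.contains s a || PySem.Set.contains s b) = true
      · refine ⟨_, List.mem_append.mpr (Or.inr (List.mem_singleton.mpr rfl)), ?_, ?_⟩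
        · refine (hm x).mpr (Or.inr (Or.inr ⟨s, hs, hx, ?_⟩))
          rcases Bool.or_eq_true_iff.mp htouch with h | h
          · exact Or.inl ((PySem.Set.contains_iff s a).mp h)
          · exact Or.inr ((PySem.Set.contains_iff s b).mp h)
        · refine (hm y).mpr (Or.inr (Or.inr ⟨s, hs, hy, ?_⟩))
          rcases Bool.or_eq_true_iff.mp htouch with h | h
          · exact Or.inl ((PySem.Set.contains_iff s a).mp h)
          · exact Or.inr ((PySem.Set.contains_iff s b).mp h)
      · refine ⟨s, List.mem_append.mpr (Or.inl ?_), hx, hy⟩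
        simp only [List.nil_append]
        exact List.mem_filter.mpr ⟨hs, by simp only [Bool.not_eq_true] at htouch; rw [htouch]; simp⟩
    · exact ⟨_, List.mem_append.mpr (Or.inr (List.mem_singleton.mpr rfl)),
        (hm x).mpr hx, (hm y).mpr hy⟩

theorem pvReach_split (cs : List (PySem.Set String)) (a b z : String) :
    pvReach cs a b z ↔ ((z = a ∨ pvSameB cs z a) ∨ (z = b ∨ pvSameB cs z b)) := by
  unfold pvReach pvSameB
  constructor
  · rintro (h | h | ⟨s, hs, hz, ha | hb⟩)
    · exact Or.inl (Or.inl h)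
    · exact Or.inr (Or.inl h)
    · exact Or.inl (Or.inr ⟨s, hs, hz, ha⟩)
    · exact Or.inr (Or.inr ⟨s, hs, hz, hb⟩)
  · rintro ((h | ⟨s, hs, hz, ha⟩) | (h | ⟨s, hs, hz, hb⟩))
    · exact Or.inl h
    · exact Or.inr (Or.inr ⟨s, hs, hz, Or.inl ha⟩)
    · exact Or.inr (Or.inl h)
    · exact Or.inr (Or.inr ⟨s, hs, hz, Or.inr hb⟩)

theorem pvMainInv (words : List String) (hnd : words.Nodup) :
    ∀ (ps : List (List String)) (st : PvUF) (f d : Nat → Nat) (cs : List (PySem.Set String)),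
    (∀ p ∈ ps, ∃ a b, p = [a, b] ∧ a ∈ words ∧ b ∈ words) →
    PvInv st.id f d → st.map = pvMapOf words → st.id.length = words.length →
    (∀ x ∈ words, ∀ y ∈ words,
      (f ((pvMapOf words).getD x 0).toNat = f ((pvMapOf words).getD y 0).toNat ↔
        (x = y ∨ pvSameB cs x y))) →
    ∃ f' d',
      PvInv (ps.foldl (fun st p => match p with | [a, b] => pvConnect st a b | _ => st) st).id f' d' ∧
      (ps.foldl (fun st p => match p with | [a, b] => pvConnect st a b | _ => st) st).map = pvMapOf words ∧
      (ps.foldl (fun st p => match p with | [a, b] => pvConnect st a b | _ => st) st).id.length = words.length ∧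
      (∀ x ∈ words, ∀ y ∈ words,
        (f' ((pvMapOf words).getD x 0).toNat = f' ((pvMapOf words).getD y 0).toNat ↔
          (x = y ∨ pvSameB (ps.foldl pvStepB cs) x y))) := by
  intro ps
  induction ps with
  | nil => intro st f d cs _ hinv hmap hlen hrel; exact ⟨f, d, hinv, hmap, hlen, hrel⟩
  | cons p rest ih =>
    intro st f d cs hps hinv hmap hlen hrel
    obtain ⟨a, b, rfl, haw, hbw⟩ := hps p (List.mem_cons_self ..)
    simp only [List.foldl_cons]
    have hia := pvIdx_mem words hnd a haw
    have hib := pvIdx_mem words hnd b hbw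
    obtain ⟨f1, d1, hinv1, hmap1, hlen1, hrel1⟩ := pvUnion_spec st f d hinv
      (st.map.getD a 0) (st.map.getD b 0)
      (by rw [hmap]; exact hia.1) (by rw [hmap]; exact hib.1)
      (by rw [hmap, hlen]; exact hia.2.1) (by rw [hmap, hlen]; exact hib.2.1)
    have hReach : ∀ z, z ∈ words →
        (pvReach cs a b z ↔
          (f ((pvMapOf words).getD z 0).toNat = f ((pvMapOf words).getD a 0).toNat ∨
           f ((pvMapOf words).getD z 0).toNat = f ((pvMapOf words).getD b 0).toNat)) := by
      intro z hz
      rw [pvReach_split]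
      rw [← hrel z hz a haw, ← hrel z hz b hbw]
    refine ih (pvConnect st a b) f1 d1 (pvMergePair cs a b)
      (fun p hp => hps p (List.mem_cons_of_mem _ hp)) ?_ ?_ ?_ ?_
    · exact hinv1
    · exact hmap1.trans hmap
    · exact hlen1.trans hlen
    · intro x hx y hy
      rw [pvMergePair_sameB]
      have h1 := hrel1 ((pvMapOf words).getD x 0).toNat ((pvMapOf words).getD y 0).toNat
      rw [hmap] at h1
      have hxy := hrel x hx y hy
      have hrx := hReach x hx
      have hry := hReach y hy
      rw [h1, hxy, hrx, hry, or_assoc]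

theorem pvQuery (words : List String) (hnd : words.Nodup) (cs : List (PySem.Set String)) :
    ∀ (qs : List (String × String)) (st : PvUF) (f d : Nat → Nat),
    PvInv st.id f d → st.map = pvMapOf words → st.id.length = words.length →
    (∀ q ∈ qs, q.1 ∈ words ∧ q.2 ∈ words) →
    (∀ x ∈ words, ∀ y ∈ words,
      (f ((pvMapOf words).getD x 0).toNat = f ((pvMapOf words).getD y 0).toNat ↔
        (x = y ∨ pvSameB cs x y))) →
    pvCheckAll st qs = qs.all (fun w =>
      w.1 == w.2 || cs.any (fun s => PySem.Set.contains s w.1 && PySem.Set.contains s w.2)) := by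
  intro qs
  induction qs with
  | nil => intro st f d _ _ _ _ _; rfl
  | cons q rest ih =>
    obtain ⟨w1, w2⟩ := q
    intro st f d hinv hmap hlen hq hrel
    obtain ⟨hw1, hw2⟩ := hq (w1, w2) (List.mem_cons_self ..)
    have hia := pvIdx_mem words hnd w1 hw1
    have hib := pvIdx_mem words hnd w2 hw2
    obtain ⟨hb, hm', hl', hi'⟩ := pvConnected_spec st f d hinv w1 w2
      (by rw [hmap]; exact hia.1) (by rw [hmap, hlen]; exact hia.2.1)
      (by rw [hmap]; exact hib.1) (by rw [hmap, hlen]; exact hib.2.1)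
    have hiff : (f ((pvMapOf words).getD w1 0).toNat = f ((pvMapOf words).getD w2 0).toNat) ↔
        (w1 = w2 ∨ pvSameB cs w1 w2) := hrel w1 hw1 w2 hw2
    have helem : (w1 == w2 || cs.any (fun s => PySem.Set.contains s w1 && PySem.Set.contains s w2)) = true ↔
        (w1 = w2 ∨ pvSameB cs w1 w2) := by
      rw [Bool.or_eq_true_iff, beq_iff_eq, List.any_eq_true]
      unfold pvSameB
      constructor
      · rintro (h | ⟨s, hs, hcc⟩)
        · exact Or.inl h
        · rw [Bool.and_eq_true] at hcc
          exact Or.inr ⟨s, hs, (PySem.Set.contains_iff s w1).mp hcc.1,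
            (PySem.Set.contains_iff s w2).mp hcc.2⟩
      · rintro (h | ⟨s, hs, hx, hy⟩)
        · exact Or.inl h
        · refine Or.inr ⟨s, hs, ?_⟩
          rw [Bool.and_eq_true]
          exact ⟨(PySem.Set.contains_iff s w1).mpr hx, (PySem.Set.contains_iff s w2).mpr hy⟩
    simp only [pvCheckAll, List.all_cons]
    rw [hb, hmap]
    by_cases hc : f ((pvMapOf words).getD w1 0).toNat = f ((pvMapOf words).getD w2 0).toNat
    · rw [if_pos (by simp [hc])]
      rw [show (w1 == w2 || cs.any (fun s => PySem.Set.contains s w1 && PySem.Set.contains s w2)) = true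
          from helem.mpr (hiff.mp hc)]
      rw [Bool.true_and]
      exact ih (pvConnected st w1 w2).1 f d hi' (hm'.trans hmap) (hl'.trans hlen)
        (fun q hq' => hq q (List.mem_cons_of_mem _ hq')) hrel
    · rw [if_neg (by simp [hc])]
      have : (w1 == w2 || cs.any (fun s => PySem.Set.contains s w1 && PySem.Set.contains s w2)) = false := by
        rw [← Bool.not_eq_true]
        intro h
        exact hc (hiff.mpr (helem.mp h))
      rw [this, Bool.false_and]

-- ===== VERDICT (by name: the statement is the Claim_ definition above) =====
theorem similaritys_spec : Claim_equal_similaritys := by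
  intro s1 s2 ps _ hpre
  unfold Spec_similaritys similaritys similaritys_alt
  by_cases hl : s1.length ≠ s2.length
  · rw [if_pos hl, if_pos hl]
  · rw [if_neg hl, if_neg hl]
    have hleq : s1.length = s2.length := not_not.mp hl
    have hp2 : ∀ p ∈ ps, p.length = 2 := by
      rcases hpre with h | h
      · exact absurd hleq h
      · exact h
    dsimp only
    set pairs := ps.foldl (fun x y => x ++ y) [] with hpairs
    set words := PySem.Set.ofList (pairs ++ s1 ++ s2) with hwords
    have hnd : words.Nodup := PySem.Set.nodup_ofList _
    have hmemw : ∀ x, x ∈ pairs ++ s1 ++ s2 → x ∈ words :=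
      fun x h => (PySem.Set.mem_ofList _ x).mpr h
    have hflat : pairs = ps.flatten := by
      rw [hpairs]
      simpa using PySem.List.foldl_append_eq_flatten ps []
    have hps : ∀ p ∈ ps, ∃ a b, p = [a, b] ∧ a ∈ words ∧ b ∈ words := by
      intro p hp
      have h2 := hp2 p hp
      obtain ⟨a, b, rfl⟩ : ∃ a b, p = [a, b] := by
        rcases p with _ | ⟨a, _ | ⟨b, _ | ⟨c, t⟩⟩⟩
        · simp at h2
        · simp at h2
        · exact ⟨a, b, rfl⟩
        · simp at h2
      have hmema : a ∈ pairs := by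
        rw [hflat]; exact List.mem_flatten.mpr ⟨[a, b], hp, List.mem_cons_self ..⟩
      have hmemb : b ∈ pairs := by
        rw [hflat]
        exact List.mem_flatten.mpr ⟨[a, b], hp, List.mem_cons_of_mem _ (List.mem_cons_self ..)⟩
      exact ⟨a, b, rfl,
        hmemw a (List.mem_append.mpr (Or.inl (List.mem_append.mpr (Or.inl hmema)))),
        hmemw b (List.mem_append.mpr (Or.inl (List.mem_append.mpr (Or.inl hmemb))))⟩
    have hinv0 : PvInv (pvUFInit words).id (fun k => k) (fun _ => 0) := pvInit_inv words.length
    have hlen0 : (pvUFInit words).id.length = words.length := by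
      show (PySem.List.pyRange 0 (words.length : Int) 1).length = words.length
      rw [PySem.List.length_pyRange_one]
      omega
    have hrel0 : ∀ x ∈ words, ∀ y ∈ words,
        ((fun k : Nat => k) ((pvMapOf words).getD x 0).toNat =
          (fun k : Nat => k) ((pvMapOf words).getD y 0).toNat ↔
          (x = y ∨ pvSameB [] x y)) := by
      intro x hx y hy
      constructor
      · intro h
        exact Or.inl (pvIdx_inj words hnd x y hx hy h)
      · rintro (rfl | ⟨s, hs, _⟩)
        · rfl
        · exact absurd hs (List.not_mem_nil)
    obtain ⟨f', d', hinv', hmap', hlen', hrel'⟩ :=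
      pvMainInv words hnd ps (pvUFInit words) (fun k => k) (fun _ => 0) [] hps hinv0 rfl hlen0 hrel0
    have hqmem : ∀ q ∈ s1.zip s2, q.1 ∈ words ∧ q.2 ∈ words := by
      intro q hq
      obtain ⟨h1, h2⟩ := List.of_mem_zip hq
      exact ⟨hmemw q.1 (List.mem_append.mpr (Or.inl (List.mem_append.mpr (Or.inr h1)))),
        hmemw q.2 (List.mem_append.mpr (Or.inr h2))⟩
    exact pvQuery words hnd _ (s1.zip s2) _ f' d' hinv' hmap' hlen' hqmem hrel'
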